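-- pv_equiv track=rewrite | github.com/benjfield/advent_of_code | advent/year_2019/day_6.py | distance_to_cache
-- ===== SOURCE A (Python) =====
-- def distance_to_cache(orbits, letter, orbit_cache):
--     if letter in orbit_cache:
--         return 0, orbit_cache[letter]
--
--     if letter in orbits:
--         distance_from_san_to_cache, distance_from_cache_to_center = distance_to_cache(orbits, orbits[letter], orbit_cache)
--         distance_from_san_to_cache += 1
--         return distance_from_san_to_cache, distance_from_cache_to_center
--     else:
--         return 0, 0
-- ===== SOURCE B (Python) =====
-- def distance_to_cache(orbits, letter, orbit_cache):
--     # Stage 1: materialise the whole parent chain starting at letter,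
--     # stopping at the first cached node or when the chain leaves orbits.
--     chain = [letter]
--     while chain[-1] not in orbit_cache and chain[-1] in orbits:
--         chain.append(orbits[chain[-1]])
--     # Stage 2: the distance is the number of hops made; the second
--     # component is the cached value at the endpoint (0 if off-chain).
--     last = chain[-1]
--     return len(chain) - 1, orbit_cache[last] if last in orbit_cache else 0
-- ===== Notes on version B (the rewrite author's own statement) =====
-- stated objective: alternative
-- what changed: Replaces the call-stack recursion (which adds 1 to the first component at every level on the way back) with a two-stage pass: first materialise the whole parent chain as a list, then read the answer off as (len(chain)-1, cached value at the endpoint).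
import Mathlib
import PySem

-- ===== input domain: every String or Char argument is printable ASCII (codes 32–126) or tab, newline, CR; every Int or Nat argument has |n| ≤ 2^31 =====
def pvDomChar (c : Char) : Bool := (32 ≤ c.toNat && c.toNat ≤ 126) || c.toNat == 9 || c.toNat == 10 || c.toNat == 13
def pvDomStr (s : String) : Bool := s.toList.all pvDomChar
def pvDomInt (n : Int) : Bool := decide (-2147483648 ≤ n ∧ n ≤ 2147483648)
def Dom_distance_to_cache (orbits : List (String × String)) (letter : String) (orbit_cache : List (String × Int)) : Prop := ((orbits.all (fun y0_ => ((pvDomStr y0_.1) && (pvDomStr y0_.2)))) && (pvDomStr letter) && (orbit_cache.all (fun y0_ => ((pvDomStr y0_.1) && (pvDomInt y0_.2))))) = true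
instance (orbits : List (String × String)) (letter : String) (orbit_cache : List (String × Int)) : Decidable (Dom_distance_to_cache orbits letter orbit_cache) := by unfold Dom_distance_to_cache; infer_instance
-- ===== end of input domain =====

-- B replaces A's call-stack recursion by a two-stage pass: build the parent chain as a list, then read the answer off its length and endpoint (alternative decomposition; equivalence proved on terminating chains).


-- ===== PORT A =====
-- A's recursion is not structurally decreasing (it follows parent pointers), so the
-- port carries a fuel argument; under Pre_ the chain stops within orbits.length + 1
-- steps (a terminating chain visits distinct orbit keys), so the fuel is never exhausted
-- on admitted inputs and the port is exact there.
def dtcGoA (orbits : List (String × String)) (orbit_cache : List (String × Int)) : Nat → String → Int × Int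
  | 0, _ => (0, 0)
  | n + 1, letter =>
    match PySem.Dict.get? (PySem.Dict.mk orbit_cache) letter with
    | some v => (0, v)                                   -- if letter in orbit_cache: return 0, orbit_cache[letter]
    | none =>
      match PySem.Dict.get? (PySem.Dict.mk orbits) letter with
      | some p =>                                        -- recursive call, then += 1 on the first component
        let r := dtcGoA orbits orbit_cache n p
        (r.1 + 1, r.2)
      | none => (0, 0)                                   -- else: return 0, 0

def distance_to_cache (orbits : List (String × String)) (letter : String) (orbit_cache : List (String × Int)) : Int × Int :=
  dtcGoA orbits orbit_cache (orbits.length + 1) letter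

-- ===== PORT B =====
-- Source B stage 1: the while-loop appending parents to `chain` until the tail node is
-- cached or off-orbits. The chain is kept newest-first (cons = Python append, head =
-- chain[-1]); same fuel convention as port A.
def dtcChain (orbits : List (String × String)) (orbit_cache : List (String × Int)) : Nat → List String → List String
  | 0, chain => chain
  | n + 1, chain =>
    let lastNode := chain.headD ""
    if (PySem.Dict.get? (PySem.Dict.mk orbit_cache) lastNode).isSome then chain
    else
      match PySem.Dict.get? (PySem.Dict.mk orbits) lastNode with
      | some p => dtcChain orbits orbit_cache n (p :: chain)     -- chain.append(orbits[chain[-1]])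
      | none => chain

-- Source B stage 2: distance = len(chain) - 1; endpoint value from the cache, else 0.
def distance_to_cache_alt (orbits : List (String × String)) (letter : String) (orbit_cache : List (String × Int)) : Int × Int :=
  let chain := dtcChain orbits orbit_cache (orbits.length + 1) [letter]
  let lastNode := chain.headD ""
  ((chain.length : Int) - 1, (PySem.Dict.get? (PySem.Dict.mk orbit_cache) lastNode).getD 0)

-- ===== PRECONDITION & SPEC =====
-- A recurses forever (RecursionError) when the parent chain from letter runs into a cycle
-- of orbits avoiding the cache; Pre_ excludes exactly those inputs: some iterate of the
-- parent map within orbits.length steps lands on a stopping node (cached, or not a key of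
-- orbits). The bound is exact — a terminating chain visits pairwise-distinct keys of orbits.
def dtcParent (orbits : List (String × String)) (s : String) : String :=
  (PySem.Dict.get? (PySem.Dict.mk orbits) s).getD s

def dtcIsStop (orbits : List (String × String)) (orbit_cache : List (String × Int)) (s : String) : Bool :=
  (PySem.Dict.get? (PySem.Dict.mk orbit_cache) s).isSome || (PySem.Dict.get? (PySem.Dict.mk orbits) s).isNone

def Pre_distance_to_cache (orbits : List (String × String)) (letter : String) (orbit_cache : List (String × Int)) : Prop :=
  ((List.range (orbits.length + 1)).any fun k =>
    dtcIsStop orbits orbit_cache ((dtcParent orbits)^[k] letter)) = true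
instance (orbits : List (String × String)) (letter : String) (orbit_cache : List (String × Int)) : Decidable (Pre_distance_to_cache orbits letter orbit_cache) := by unfold Pre_distance_to_cache; infer_instance

def pvWitness_distance_to_cache : (List (String × String)) × String × (List (String × Int)) :=
  ([("B", "COM"), ("C", "B")], "C", [("COM", 0)])

def Spec_distance_to_cache (orbits : List (String × String)) (letter : String) (orbit_cache : List (String × Int)) (out : Int × Int) : Prop := out = distance_to_cache_alt orbits letter orbit_cache
instance (orbits : List (String × String)) (letter : String) (orbit_cache : List (String × Int)) (out : Int × Int) : Decidable (Spec_distance_to_cache orbits letter orbit_cache out) := by unfold Spec_distance_to_cache; infer_instance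

-- ===== CLAIM =====
def Claim_equal_distance_to_cache : Prop := ∀ (orbits : List (String × String)) (letter : String) (orbit_cache : List (String × Int)), Dom_distance_to_cache orbits letter orbit_cache → Pre_distance_to_cache orbits letter orbit_cache → Spec_distance_to_cache orbits letter orbit_cache (distance_to_cache orbits letter orbit_cache)

-- ===== LEMMAS AND PROOFS =====
-- Proof-side reformulation of Pre_: a fuel-indexed stopping predicate matching the
-- recursion structure of the ports.
def dtcStops (orbits : List (String × String)) (orbit_cache : List (String × Int)) : Nat → String → Bool
  | 0, _ => false
  | n + 1, letter =>
    if (PySem.Dict.get? (PySem.Dict.mk orbit_cache) letter).isSome then true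
    else
      match PySem.Dict.get? (PySem.Dict.mk orbits) letter with
      | some p => dtcStops orbits orbit_cache n p
      | none => true

theorem dtcStops_of_iterate (orbits : List (String × String)) (orbit_cache : List (String × Int)) :
    ∀ (n : Nat) (letter : String),
      (∃ k, k < n ∧ dtcIsStop orbits orbit_cache ((dtcParent orbits)^[k] letter) = true) →
      dtcStops orbits orbit_cache n letter = true := by
  intro n
  induction n with
  | zero => rintro letter ⟨k, hk, _⟩; omega
  | succ n ih =>
    rintro letter ⟨k, hk, hstop⟩
    simp only [dtcStops]
    cases hc : PySem.Dict.get? (PySem.Dict.mk orbit_cache) letter with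
    | some v => simp
    | none =>
      simp only [Option.isSome_none, Bool.false_eq_true, if_false]
      cases ho : PySem.Dict.get? (PySem.Dict.mk orbits) letter with
      | none => rfl
      | some p =>
        cases k with
        | zero =>
          simp [dtcIsStop, hc, ho] at hstop
        | succ j =>
          apply ih
          refine ⟨j, by omega, ?_⟩
          rw [Function.iterate_succ_apply, dtcParent, ho] at hstop
          exact hstop

theorem pre_to_stops (orbits : List (String × String)) (letter : String) (orbit_cache : List (String × Int)) :
    Pre_distance_to_cache orbits letter orbit_cache →
    dtcStops orbits orbit_cache (orbits.length + 1) letter = true := by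
  intro h
  unfold Pre_distance_to_cache at h
  simp only [List.any_eq_true, List.mem_range] at h
  obtain ⟨k, hk, hs⟩ := h
  exact dtcStops_of_iterate orbits orbit_cache _ letter ⟨k, hk, hs⟩

-- On any stopping input, A's recursive result is read off B's chain: the first
-- component is the number of nodes added past the seed, the second the cache value
-- at the chain's head. Proved for a chain grown on top of any accumulator `acc`.
theorem dtcGoA_eq_chain (orbits : List (String × String)) (orbit_cache : List (String × Int)) :
    ∀ (n : Nat) (letter : String) (acc : List String),
      dtcStops orbits orbit_cache n letter = true →
      dtcGoA orbits orbit_cache n letter =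
        (((dtcChain orbits orbit_cache n (letter :: acc)).length : Int) - (acc.length + 1),
          (PySem.Dict.get? (PySem.Dict.mk orbit_cache)
            ((dtcChain orbits orbit_cache n (letter :: acc)).headD "")).getD 0) := by
  intro n
  induction n with
  | zero => intro letter acc h; simp [dtcStops] at h
  | succ n ih =>
    intro letter acc h
    simp only [dtcStops] at h
    simp only [dtcGoA, dtcChain, List.headD_cons]
    cases hc : PySem.Dict.get? (PySem.Dict.mk orbit_cache) letter with
    | some v => simp [hc]
    | none =>
      simp [hc] at h ⊢
      cases ho : PySem.Dict.get? (PySem.Dict.mk orbits) letter with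
      | some p =>
        simp [ho] at h ⊢
        rw [ih p (letter :: acc) h]
        constructor
        · simp only [List.length_cons]; push_cast; ring
        · cases dtcChain orbits orbit_cache n (p :: letter :: acc) <;> simp [List.headD]
      | none => simp [hc]

-- ===== VERDICT =====
theorem distance_to_cache_spec : Claim_equal_distance_to_cache := by
  intro orbits letter orbit_cache _ hpre
  unfold Spec_distance_to_cache distance_to_cache distance_to_cache_alt
  rw [dtcGoA_eq_chain orbits orbit_cache (orbits.length + 1) letter []
      (pre_to_stops orbits letter orbit_cache hpre)]
  simp
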